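-- pv_equiv track=rewrite | github.com/CT2503322/p2-6-phishing | backend/core/explain.py | _collect_action_items
-- ===== SOURCE A (Python) =====
-- from typing import List, Sequence, Tuple, Set
--
-- def _collect_action_items(detail_lines: Sequence[str], general_actions: Sequence[str]) -> List[str]:
--     items: List[str] = []
--     seen: Set[str] = set()
--
--     for line in detail_lines:
--         action = _extract_action_clause(line)
--         if action and action not in seen:
--             items.append(action)
--             seen.add(action)
--
--     for raw in general_actions:
--         normalized = raw.replace('Next step:', '', 1).strip()
--         normalized = normalized.rstrip('. ')
--         if normalized and normalized not in seen:
--             items.append(normalized)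
--             seen.add(normalized)
--
--     return items
--
-- def _extract_action_clause(text: str) -> str | None:
--     if 'Action:' not in text:
--         return None
--     clause = text.split('Action:', 1)[1].strip()
--     clause = clause.rstrip('. ')
--     return clause or None
-- ===== SOURCE B (Python) =====
-- from typing import List, Sequence
--
-- def _collect_action_items(detail_lines: Sequence[str], general_actions: Sequence[str]) -> List[str]:
--     candidates = [a for a in map(_extract_action_clause, detail_lines) if a]
--     candidates += [n for raw in general_actions
--                    if (n := raw.replace('Next step:', '', 1).strip().rstrip('. '))]
--     return _dedup(candidates)
--
-- def _dedup(xs: List[str]) -> List[str]: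
--     # keep the head, strip every later copy of it from the rest, repeat
--     out: List[str] = []
--     while xs:
--         head = xs[0]
--         out.append(head)
--         xs = [x for x in xs[1:] if x != head]
--     return out
--
-- def _extract_action_clause(text: str) -> str | None:
--     if 'Action:' not in text:
--         return None
--     clause = text.split('Action:', 1)[1].strip()
--     clause = clause.rstrip('. ')
--     return clause or None
-- ===== Notes on version B (the rewrite author's own statement) =====
-- stated objective: alternative
-- what changed: B first builds the full candidate list (extracted clauses plus normalized general actions, empties dropped) and then deduplicates with no seen-set at all: a loop that appends the head and filters every later copy of it out of the remaining list; A instead threads a mutable seen-set through two appending loops.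
import Mathlib
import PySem

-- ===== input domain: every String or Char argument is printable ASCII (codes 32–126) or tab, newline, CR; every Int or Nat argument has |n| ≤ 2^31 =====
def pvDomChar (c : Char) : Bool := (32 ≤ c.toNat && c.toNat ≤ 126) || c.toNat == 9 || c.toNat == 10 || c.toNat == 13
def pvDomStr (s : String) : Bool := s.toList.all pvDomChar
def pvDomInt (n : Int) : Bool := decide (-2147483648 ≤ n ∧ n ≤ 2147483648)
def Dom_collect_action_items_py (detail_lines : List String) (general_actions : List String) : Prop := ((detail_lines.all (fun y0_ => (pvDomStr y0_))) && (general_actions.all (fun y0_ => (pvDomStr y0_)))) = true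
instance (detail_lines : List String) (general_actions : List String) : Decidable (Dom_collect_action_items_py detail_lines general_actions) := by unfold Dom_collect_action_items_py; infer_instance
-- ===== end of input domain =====

-- B builds the candidate list first and then deduplicates with no seen-set: a loop
-- that keeps the head and filters its copies out of the rest; objective: alternative.

-- ===== PORT A =====
-- shared helper: s.rstrip('. ') — exact hand port (drop '.' and ' ' from the right)
def pyRstripDotSpace (s : String) : String :=
  String.ofList ((s.toList.reverse.dropWhile (fun c => c == '.' || c == ' ')).reverse)

-- shared helper: raw.replace('Next step:', '', 1) — exact for a non-empty pattern and
-- empty replacement, since s.replace(old, '', 1) == ''.join(s.split(old, 1))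
def pyReplaceNextStepOnce (s : String) : String :=
  PySem.Str.join "" ((PySem.Str.splitMax? s "Next step:" 1).getD [s])

-- shared helper _extract_action_clause (B keeps it unchanged); the [1] index is safe
-- under the 'Action:' in text guard, so getD "" is exact
def extract_action_clause (text : String) : Option String :=
  if PySem.Str.isIn "Action:" text = false then none
  else
    let clause := PySem.Str.strip (((PySem.Str.splitMax? text "Action:" 1).getD []).getD 1 "")
    let clause := pyRstripDotSpace clause
    if clause == "" then none else some clause

-- normalization of one general action (the 'normalized = …' lines of A's second loop,
-- also the comprehension of B)
def normGeneral (raw : String) : String :=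
  pyRstripDotSpace (PySem.Str.strip (pyReplaceNextStepOnce raw))

-- body of A's first loop ('if action and action not in seen: append; add')
def pvLoop1Step (st : List String × PySem.Set String) (line : String) :
    List String × PySem.Set String :=
  match extract_action_clause line with
  | none => st
  | some action =>
    if action ≠ "" ∧ PySem.Set.contains st.2 action = false then
      (st.1 ++ [action], PySem.Set.add st.2 action)
    else st

-- body of A's second loop
def pvLoop2Step (st : List String × PySem.Set String) (raw : String) :
    List String × PySem.Set String :=
  if normGeneral raw ≠ "" ∧ PySem.Set.contains st.2 (normGeneral raw) = false then
    (st.1 ++ [normGeneral raw], PySem.Set.add st.2 (normGeneral raw))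
  else st

def collect_action_items_py (detail_lines : List String) (general_actions : List String) : List String :=
  (general_actions.foldl pvLoop2Step
    (detail_lines.foldl pvLoop1Step ([], PySem.Set.empty))).1

-- ===== PORT B =====
-- B's first comprehension: 'if a' keeps a clause that is neither None nor empty
def pvClause (line : String) : Option String :=
  match extract_action_clause line with
  | none => none
  | some a => if a == "" then none else some a

-- B's _dedup loop: append the head to out, strip its copies from the rest, repeat
def pvDedupLoop : List String → List String → List String
  | out, [] => out
  | out, h :: t => pvDedupLoop (out ++ [h]) (t.filter (fun x => x != h))
termination_by _ xs => xs.length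
decreasing_by simpa using Nat.lt_succ_of_le (List.length_filter_le _ t)

def collect_action_items_py_alt (detail_lines : List String) (general_actions : List String) : List String :=
  pvDedupLoop []
    (detail_lines.filterMap pvClause ++
     (general_actions.map normGeneral).filter (fun n => ¬ n == ""))

-- ===== PRECONDITION & SPEC =====
def Spec_collect_action_items_py (detail_lines : List String) (general_actions : List String) (out : List String) : Prop := out = collect_action_items_py_alt detail_lines general_actions
instance (detail_lines : List String) (general_actions : List String) (out : List String) : Decidable (Spec_collect_action_items_py detail_lines general_actions out) := by unfold Spec_collect_action_items_py; infer_instance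

-- ===== CLAIM (what is proved, stated in full; the proofs are below) =====
def Claim_equal_collect_action_items_py : Prop := ∀ (detail_lines : List String) (general_actions : List String), Dom_collect_action_items_py detail_lines general_actions → Spec_collect_action_items_py detail_lines general_actions (collect_action_items_py detail_lines general_actions)

-- ===== LEMMAS AND PROOFS =====

-- the common step of A's two loops, on an arbitrary candidate string
def pvStep (st : List String × PySem.Set String) (c : String) : List String × PySem.Set String :=
  if c ≠ "" ∧ PySem.Set.contains st.2 c = false then (st.1 ++ [c], PySem.Set.add st.2 c) else st

theorem pvLoop1_eq (d : List String) (st : List String × PySem.Set String) :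
    d.foldl pvLoop1Step st = (d.filterMap extract_action_clause).foldl pvStep st := by
  induction d generalizing st with
  | nil => rfl
  | cons l ls ih =>
    cases h : extract_action_clause l <;>
      simp [h, ih, pvLoop1Step, pvStep]

theorem pvLoop2_eq (g : List String) (st : List String × PySem.Set String) :
    g.foldl pvLoop2Step st = (g.map normGeneral).foldl pvStep st := by
  induction g generalizing st with
  | nil => simp only [List.foldl_nil, List.map_nil]
  | cons r rs ih =>
    have hstep : ∀ st, pvLoop2Step st r = pvStep st (normGeneral r) := by
      intro st; simp only [pvLoop2Step, pvStep]
    rw [List.map_cons, List.foldl_cons, List.foldl_cons, hstep, ih]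

-- on the diagonal (items = seen, which A maintains) one step is Set.add of a non-empty candidate
theorem pvStep_diag (acc : List String) (c : String) :
    pvStep (acc, acc) c = (if c == "" then acc else PySem.Set.add acc c,
                           if c == "" then acc else PySem.Set.add acc c) := by
  by_cases hc : c = ""
  · simp [pvStep, hc]
  · by_cases hm : c ∈ acc <;>
      simp [pvStep, hc, hm, PySem.Set.add, PySem.Set.contains]

theorem pvFoldl_diag (cs : List String) (acc : List String) :
    cs.foldl pvStep (acc, acc) =
      ((cs.filter (fun c => ¬ c == "")).foldl PySem.Set.add acc,
       (cs.filter (fun c => ¬ c == "")).foldl PySem.Set.add acc) := by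
  induction cs generalizing acc with
  | nil => simp
  | cons c cs ih =>
    by_cases hc : c = "" <;>
      simp [List.foldl_cons, pvStep_diag, hc, ih]

-- B's filterMap-with-empty-drop is A's filterMap followed by the non-empty filter
theorem pvClause_filter (d : List String) :
    d.filterMap pvClause =
      (d.filterMap extract_action_clause).filter (fun c => ¬ c == "") := by
  induction d with
  | nil => rfl
  | cons l ls ih =>
    cases h : extract_action_clause l with
    | none =>
      have hl : pvClause l = none := by simp [pvClause, h]
      simp [hl, h, ih]
    | some a =>
      by_cases ha : a = ""
      · have hl : pvClause l = none := by simp [pvClause, h, ha]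
        simp [hl, h, ha, ih]
      · have hl : pvClause l = some a := by simp [pvClause, h, ha]
        simp [hl, h, ha, ih]

-- first-occurrence dedup by left fold over Set.add equals B's filter-the-rest loop
theorem pvFoldl_add_eq (cs : List String) (acc : List String) :
    cs.foldl PySem.Set.add acc = pvDedupLoop acc (cs.filter (fun c => !(acc.contains c))) := by
  induction cs generalizing acc with
  | nil => simp [pvDedupLoop]
  | cons c cs ih =>
    by_cases hm : c ∈ acc
    · have : PySem.Set.add acc c = acc := by simp [PySem.Set.add, PySem.Set.contains, hm]
      rw [List.foldl_cons, this]
      simp [ih, hm]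
    · have hadd : PySem.Set.add acc c = acc ++ [c] := by
        simp [PySem.Set.add, PySem.Set.contains, hm]
      have hfil : cs.filter (fun x => !((acc ++ [c]).contains x)) =
          (cs.filter (fun x => !(acc.contains x))).filter (fun x => x != c) := by
        rw [List.filter_filter]
        apply List.filter_congr
        intro x _
        by_cases hxc : x = c <;> by_cases hxa : x ∈ acc <;> simp [hxc, hxa]
      rw [List.foldl_cons, hadd, ih, hfil]
      simp [hm, pvDedupLoop]

-- ===== VERDICT (by name: the statement is the Claim_ definition above) =====
theorem collect_action_items_py_spec : Claim_equal_collect_action_items_py := by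
  intro d g _
  unfold Spec_collect_action_items_py collect_action_items_py collect_action_items_py_alt
  rw [pvLoop1_eq, pvLoop2_eq, show (([], PySem.Set.empty) : List String × PySem.Set String)
        = (([] : List String), ([] : List String)) from rfl,
      pvFoldl_diag, pvFoldl_diag, pvClause_filter,
      ← List.foldl_append, pvFoldl_add_eq]
  simp
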